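-- pv_equiv track=rewrite | github.com/eidsnessje-nih/OneDrive-ODL-Reader | odl.py | tokenized_replace
-- ===== SOURCE A (Python) =====
-- def tokenized_replace(string, map):
--     output = ''
--     tokens = ':\\.@%#&*-+=|{}!?<>;:~()//"\''
--     parts = [] # [ ('word', 1), (':', 0), ..] word=1, token=0
--     last_word = ''
--     last_token = ''
--     for i, char in enumerate(string):
--         if char in tokens:
--             if last_word:
--                 parts.append((last_word, 1))
--                 last_word = ''
--             if last_token:
--                 last_token += char
--             else:
--                 last_token = char
--         else:
--             if last_token:
--                 parts.append((last_token, 0))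
--                 last_token = ''
--             if last_word:
--                 last_word += char
--             else:
--                 last_word = char
--     if last_token:
--         parts.append((last_token, 0))
--     if last_word:
--         parts.append((last_word, 1))
--
--     # now join all parts replacing the words
--     for part in parts:
--         if part[1] == 0: # token
--             output += part[0]
--         else: # word
--             word = part[0]
--             if word in map:
--                 output += map[word]
--             else:
--                 output += word
--     return output
-- ===== SOURCE B (Python) =====
-- def tokenized_replace(string, map):
--     # Two-pointer run scanner: cut the string into maximal runs of token /
--     # non-token characters in one pass, map word runs, join at the end.
--     tokens = ':\\.@%#&*-+=|{}!?<>;:~()//"\''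
--     out = []
--     i, n = 0, len(string)
--     while i < n:
--         is_tok = string[i] in tokens
--         j = i
--         while j < n and (string[j] in tokens) == is_tok:
--             j += 1
--         run = string[i:j]
--         out.append(run if is_tok else map.get(run, run))
--         i = j
--     return ''.join(out)
-- ===== Notes on version B (the rewrite author's own statement) =====
-- stated objective: simpler
-- what changed: Replaces the char-by-char state machine with its parts list, pending word/token buffers and post-loop flushes by a two-pointer scanner that slices the string into maximal token/non-token runs and joins the mapped runs directly.
import Mathlib
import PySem

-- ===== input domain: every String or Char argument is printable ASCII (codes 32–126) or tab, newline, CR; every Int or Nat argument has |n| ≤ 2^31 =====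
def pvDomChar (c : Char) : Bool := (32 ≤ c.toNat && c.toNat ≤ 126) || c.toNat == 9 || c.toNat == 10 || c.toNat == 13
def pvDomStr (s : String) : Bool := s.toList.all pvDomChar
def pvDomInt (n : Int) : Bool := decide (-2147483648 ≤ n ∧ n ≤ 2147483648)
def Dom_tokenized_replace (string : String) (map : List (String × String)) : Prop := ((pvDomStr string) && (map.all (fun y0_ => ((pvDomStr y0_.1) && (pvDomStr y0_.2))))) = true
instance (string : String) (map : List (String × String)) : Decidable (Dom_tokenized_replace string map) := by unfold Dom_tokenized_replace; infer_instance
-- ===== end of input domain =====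

-- B replaces A's char-by-char state machine (parts list + pending buffers + post-loop
-- flushes) by a two-pointer maximal-run scanner; return value only, no side effects.

-- the token string both Pythons share, and `char in tokens` (substring membership of a 1-char string)
def pvTokens : List Char := ":\\.@%#&*-+=|{}!?<>;:~()//\"'".toList
def pvIsTok (c : Char) : Bool := PySem.Chars.isIn [c] pvTokens

-- ===== PORT A =====
-- A's first loop: state (parts, last_word, last_token); parts entries are (run, 1=word / 0=token)
def tokA_scan : List Char → List (List Char × Nat) × List Char × List Char → List (List Char × Nat) × List Char × List Char
  | [], st => st
  | c :: cs, (parts, lw, lt) =>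
    if pvIsTok c then
      let parts := if lw ≠ [] then parts ++ [(lw, 1)] else parts
      let lt := if lt ≠ [] then lt ++ [c] else [c]
      tokA_scan cs (parts, [], lt)
    else
      let parts := if lt ≠ [] then parts ++ [(lt, 0)] else parts
      let lw := if lw ≠ [] then lw ++ [c] else [c]
      tokA_scan cs (parts, lw, [])

def tokenized_replace (string : String) (map : List (String × String)) : String :=
  let st := tokA_scan string.toList ([], [], [])
  let parts := st.1
  let parts := if st.2.2 ≠ [] then parts ++ [(st.2.2, 0)] else parts
  let parts := if st.2.1 ≠ [] then parts ++ [(st.2.1, 1)] else parts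
  let output := parts.foldl (fun acc p =>
    if p.2 == 0 then acc ++ p.1
    else match PySem.Dict.get? (PySem.Dict.mk map) (String.ofList p.1) with
      | some v => acc ++ v.toList
      | none => acc ++ p.1) []
  String.ofList output

-- ===== PORT B =====
-- B's outer while loop: take the maximal run of chars with the same token-ness, map word runs
def tokB_go (map : List (String × String)) : List Char → List Char
  | [] => []
  | c :: cs =>
    let t := pvIsTok c
    let run := c :: cs.takeWhile (fun d => pvIsTok d == t)
    let rest := cs.dropWhile (fun d => pvIsTok d == t)
    (if t then run
     else (PySem.Dict.getD (PySem.Dict.mk map) (String.ofList run) (String.ofList run)).toList)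
      ++ tokB_go map rest
  termination_by cs => cs.length
  decreasing_by have := List.length_dropWhile_le (fun d => pvIsTok d == pvIsTok c) cs; simp only [List.length_cons]; omega

def tokenized_replace_alt (string : String) (map : List (String × String)) : String :=
  String.ofList (tokB_go map string.toList)

-- ===== PRECONDITION & SPEC =====
def Spec_tokenized_replace (string : String) (map : List (String × String)) (out : String) : Prop := out = tokenized_replace_alt string map
instance (string : String) (map : List (String × String)) (out : String) : Decidable (Spec_tokenized_replace string map out) := by unfold Spec_tokenized_replace; infer_instance

-- ===== CLAIM (what is proved, stated in full; the proofs are below) =====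
def Claim_equal_tokenized_replace : Prop := ∀ (string : String) (map : List (String × String)), Dom_tokenized_replace string map → Spec_tokenized_replace string map (tokenized_replace string map)

-- ===== LEMMAS AND PROOFS =====

-- flag of a char as in A's parts list: 0 = token, 1 = word
def pvFlag (c : Char) : Nat := if pvIsTok c then 0 else 1

-- the run decomposition both programs compute, as a small-step machine carrying the pending run
def pendRuns : Option (List Char × Nat) → List Char → List (List Char × Nat)
  | none, [] => []
  | none, c :: cs => pendRuns (some ([c], pvFlag c)) cs
  | some (r, f), [] => [(r, f)]
  | some (r, f), c :: cs =>
    if pvFlag c = f then pendRuns (some (r ++ [c], f)) cs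
    else (r, f) :: pendRuns (some ([c], pvFlag c)) cs

-- rendering of one part (A's second loop body = B's mapped run)
def pvOut (map : List (String × String)) (p : List Char × Nat) : List Char :=
  if p.2 == 0 then p.1
  else match PySem.Dict.get? (PySem.Dict.mk map) (String.ofList p.1) with
    | some v => v.toList
    | none => p.1

theorem pendRuns_some (cs : List Char) : ∀ (r : List Char) (f : Nat),
    pendRuns (some (r, f)) cs
      = (r ++ cs.takeWhile (fun d => pvFlag d == f), f)
        :: pendRuns none (cs.dropWhile (fun d => pvFlag d == f)) := by
  induction cs with
  | nil => intro r f; simp [pendRuns]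
  | cons c cs ih =>
    intro r f
    by_cases h : pvFlag c = f
    · simp [pendRuns, h, ih]
    · simp [pendRuns, h]

theorem pvFlag_pred (c : Char) :
    (fun d => pvFlag d == pvFlag c) = (fun d => pvIsTok d == pvIsTok c) := by
  funext d
  simp only [pvFlag]
  cases hd : pvIsTok d <;> cases hc : pvIsTok c <;> simp

theorem tokB_go_eq (map : List (String × String)) : ∀ (cs : List Char),
    tokB_go map cs = (pendRuns none cs).flatMap (pvOut map) := by
  intro cs
  induction hn : cs.length using Nat.strong_induction_on generalizing cs with
  | _ n ih =>
    match cs with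
    | [] => rw [tokB_go.eq_def]; rfl
    | c :: cs =>
      rw [tokB_go.eq_def]
      dsimp only
      rw [show pendRuns none (c :: cs) = pendRuns (some ([c], pvFlag c)) cs from rfl,
          pendRuns_some, pvFlag_pred]
      rw [List.flatMap_cons]
      have hlen : (cs.dropWhile (fun d => pvIsTok d == pvIsTok c)).length < n := by
        have := List.length_dropWhile_le (fun d => pvIsTok d == pvIsTok c) cs
        simp at hn; omega
      rw [ih _ hlen _ rfl]
      congr 1
      simp only [pvOut, pvFlag, List.singleton_append]
      cases ht : pvIsTok c <;> simp [PySem.Dict.getD]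
      · cases PySem.Dict.get? (PySem.Dict.mk map) (String.ofList _) <;> simp [String.toList_ofList]

-- A's flush-at-end of the pending buffers, as a function of the scan's final state
def pvFinish (st : List (List Char × Nat) × List Char × List Char) : List (List Char × Nat) :=
  if st.2.1 ≠ [] then (if st.2.2 ≠ [] then st.1 ++ [(st.2.2, 0)] else st.1) ++ [(st.2.1, 1)]
  else (if st.2.2 ≠ [] then st.1 ++ [(st.2.2, 0)] else st.1)

def pvSt (lw lt : List Char) : Option (List Char × Nat) :=
  if lt ≠ [] then some (lt, 0) else if lw ≠ [] then some (lw, 1) else none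

theorem tokA_scan_eq : ∀ (cs : List Char) (parts : List (List Char × Nat)) (lw lt : List Char),
    (lw = [] ∨ lt = []) →
    pvFinish (tokA_scan cs (parts, lw, lt)) = parts ++ pendRuns (pvSt lw lt) cs := by
  intro cs
  induction cs with
  | nil =>
    intro parts lw lt h
    rcases h with h | h <;> subst h
    · rcases lt with _ | ⟨b, lt⟩ <;> simp_all [tokA_scan, pvFinish, pvSt, pendRuns]
    · rcases lw with _ | ⟨a, lw⟩ <;> simp_all [tokA_scan, pvFinish, pvSt, pendRuns]
  | cons c cs ih =>
    intro parts lw lt h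
    simp only [tokA_scan]
    by_cases ht : pvIsTok c
    · have hf : pvFlag c = 0 := by simp [pvFlag, ht]
      simp only [ht, if_true]
      rw [ih _ _ _ (Or.inl rfl)]
      rcases h with h | h <;> subst h
      · rcases lt with _ | ⟨b, lt⟩ <;> simp_all [pvSt, pendRuns]
      · rcases lw with _ | ⟨a, lw⟩ <;> simp_all [pvSt, pendRuns]
    · have hf : pvFlag c = 1 := by simp [pvFlag, ht]
      simp only [ht, Bool.false_eq_true, if_false]
      rw [ih _ _ _ (Or.inr rfl)]
      rcases h with h | h <;> subst h
      · rcases lt with _ | ⟨b, lt⟩ <;> simp_all [pvSt, pendRuns]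
      · rcases lw with _ | ⟨a, lw⟩ <;> simp_all [pvSt, pendRuns]

theorem foldl_out (map : List (String × String)) (parts : List (List Char × Nat)) (acc : List Char) :
    parts.foldl (fun acc p =>
      if p.2 == 0 then acc ++ p.1
      else match PySem.Dict.get? (PySem.Dict.mk map) (String.ofList p.1) with
        | some v => acc ++ v.toList
        | none => acc ++ p.1) acc = acc ++ parts.flatMap (pvOut map) := by
  induction parts generalizing acc with
  | nil => simp
  | cons p ps ih =>
    simp only [List.foldl_cons, List.flatMap_cons, ih, pvOut]
    by_cases h : p.2 == 0
    · simp [h]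
    · simp only [h]
      cases PySem.Dict.get? (PySem.Dict.mk map) (String.ofList p.1) <;> simp

-- ===== VERDICT (by name: the statement is the Claim_ definition above) =====
theorem tokenized_replace_spec : Claim_equal_tokenized_replace := by
  intro string map _
  unfold Spec_tokenized_replace
  dsimp only [tokenized_replace, tokenized_replace_alt]
  rw [tokB_go_eq, foldl_out, List.nil_append]
  have h := tokA_scan_eq string.toList [] [] [] (Or.inl rfl)
  have h0 : pvSt ([] : List Char) [] = none := rfl
  rw [h0] at h
  simp only [pvFinish, List.nil_append] at h
  rw [h]
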